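-- pv_equiv track=rewrite | github.com/hk-pG/vim-mo | packages/vimmo-ls/src/vimmo_ls/server.py | _get_ident_at_position
-- ===== SOURCE A (Python) =====
-- def _get_ident_at_position(source: str, line: int, col: int) -> str:
--     """Extract identifier at given position."""
--     lines = source.split("\n")
--     if line >= len(lines):
--         return None
--
--     target_line = lines[line]
--
--     if col >= len(target_line) or not (
--         target_line[col].isalnum() or target_line[col] == "_"
--     ):
--         return None
--
--     start = col
--     end = col
--
--     while start > 0 and (
--         target_line[start - 1].isalnum() or target_line[start - 1] == "_"
--     ):
--         start -= 1
--
--     while end < len(target_line) and (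
--         target_line[end].isalnum() or target_line[end] == "_"
--     ):
--         end += 1
--
--     if start == end:
--         return None
--
--     return target_line[start:end]
-- ===== SOURCE B (Python) =====
-- def _get_ident_at_position(source: str, line: int, col: int) -> str:
--     """Extract identifier at given position (single forward pass building word runs)."""
--     lines = source.split("\n")
--     if line >= len(lines):
--         return None
--
--     target_line = lines[line]
--     n = len(target_line)
--
--     runs = []
--     i = 0
--     while i < n:
--         if target_line[i].isalnum() or target_line[i] == "_":
--             j = i + 1
--             while j < n and (target_line[j].isalnum() or target_line[j] == "_"):
--                 j += 1
--             runs.append((i, j))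
--             i = j
--         else:
--             i += 1
--
--     for s, e in runs:
--         if s <= col < e:
--             return target_line[s:e]
--     return None
-- ===== Notes on version B (the rewrite author's own statement) =====
-- stated objective: alternative
-- what changed: B replaces A's two outward index-walking while loops (expanding left and right from the column) by a single forward pass that groups the line into word runs and then returns the run containing the column.
-- intended difference: On a negative column that wraps (Python negative indexing) into the line onto a word character, A returns an accidental slice such as '' or a fragment read from the wrapped position, while B returns None, the intended answer since the requested column is out of range of the line. — e.g. on _get_ident_at_position("ab", 0, -1): A returns some "b", B returns none
import Mathlib
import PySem

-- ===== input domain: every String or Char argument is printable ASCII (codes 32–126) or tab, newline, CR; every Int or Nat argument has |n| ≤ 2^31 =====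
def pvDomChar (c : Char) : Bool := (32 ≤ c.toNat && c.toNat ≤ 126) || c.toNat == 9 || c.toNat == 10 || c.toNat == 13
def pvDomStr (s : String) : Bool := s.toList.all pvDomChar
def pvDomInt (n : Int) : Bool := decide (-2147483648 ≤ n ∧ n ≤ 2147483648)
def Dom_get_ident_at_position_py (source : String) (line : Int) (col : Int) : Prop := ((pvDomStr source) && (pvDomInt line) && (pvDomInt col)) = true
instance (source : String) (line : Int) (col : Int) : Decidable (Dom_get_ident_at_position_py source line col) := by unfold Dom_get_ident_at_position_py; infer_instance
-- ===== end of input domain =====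

-- B replaces A's two outward index-walking while loops by one forward pass that
-- groups the line into word runs and looks the column up among them (objective: alternative).

-- the shared character class: c.isalnum() or c == "_" (identical expression in both Pythons)
def pvIsWord (c : Char) : Bool := PySem.Chars.isalnum c || c == '_'

-- ===== PORT A =====
-- `while start > 0 and (target_line[start-1].isalnum() or target_line[start-1] == "_"): start -= 1`
def pvAStart (tl : List Char) : Nat → Int → Int
  | 0, s => s
  | f+1, s => if 0 < s ∧ pvIsWord (PySem.List.pyGetD tl (s - 1) ' ') = true then pvAStart tl f (s - 1) else s

-- `while end < len(target_line) and (target_line[end].isalnum() or target_line[end] == "_"): end += 1`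
def pvAEnd (tl : List Char) : Nat → Int → Int
  | 0, e => e
  | f+1, e => if e < (tl.length : Int) ∧ pvIsWord (PySem.List.pyGetD tl e ' ') = true then pvAEnd tl f (e + 1) else e

def get_ident_at_position_py (source : String) (line : Int) (col : Int) : Option String :=
  match PySem.Str.split? source "\n" with
  | none => none
  | some lines =>
    if (lines.length : Int) ≤ line then none else
    match PySem.List.pyGet? lines line with
    | none => none   -- Python raises IndexError here (line < -len(lines)); excluded by Pre_
    | some target_line =>
      let tl := target_line.toList
      if (tl.length : Int) ≤ col then none else
      match PySem.List.pyGet? tl col with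
      | none => none -- Python raises IndexError here (col < -len(target_line)); excluded by Pre_
      | some ch =>
        if pvIsWord ch then
          let start := pvAStart tl col.toNat col
          let stop := pvAEnd tl ((tl.length : Int) - col).toNat col
          if start = stop then none
          else some (String.ofList (PySem.List.slice tl (some start) (some stop)))
        else none

-- ===== PORT B =====
-- inner `while j < n and word(target_line[j]): j += 1`
def pvBRun (tl : List Char) : Nat → Nat → Nat
  | 0, j => j
  | f+1, j => if j < tl.length ∧ pvIsWord (tl.getD j ' ') = true then pvBRun tl f (j + 1) else j

-- outer forward pass collecting the word runs
def pvBScan (tl : List Char) : Nat → Nat → List (Nat × Nat)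
  | 0, _ => []
  | f+1, i =>
    if i < tl.length then
      if pvIsWord (tl.getD i ' ') then
        (i, pvBRun tl (tl.length - (i + 1)) (i + 1)) :: pvBScan tl f (pvBRun tl (tl.length - (i + 1)) (i + 1))
      else pvBScan tl f (i + 1)
    else []

def get_ident_at_position_py_alt (source : String) (line : Int) (col : Int) : Option String :=
  match PySem.Str.split? source "\n" with
  | none => none
  | some lines =>
    if (lines.length : Int) ≤ line then none else
    match PySem.List.pyGet? lines line with
    | none => none   -- Python raises IndexError here; excluded by Pre_
    | some target_line =>
      let tl := target_line.toList
      match (pvBScan tl tl.length 0).find? (fun r => decide ((r.1 : Int) ≤ col) && decide (col < (r.2 : Int))) with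
      | some r => some (String.ofList (PySem.List.slice tl (some (r.1 : Int)) (some (r.2 : Int))))
      | none => none

-- ===== PRECONDITION & SPEC =====
-- Pre_ excludes exactly the inputs where A raises IndexError: a line index below -len(lines),
-- or (on a valid line) a column below -len(target_line).
def Pre_get_ident_at_position_py (source : String) (line : Int) (col : Int) : Prop :=
  (((PySem.Str.split? source "\n").getD []).length : Int) ≤ line ∨
    (-((((PySem.Str.split? source "\n").getD []).length : Int)) ≤ line ∧
     -(((((PySem.List.pyGet? ((PySem.Str.split? source "\n").getD []) line).getD "").toList.length : Int))) ≤ col)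
instance (source : String) (line : Int) (col : Int) : Decidable (Pre_get_ident_at_position_py source line col) := by unfold Pre_get_ident_at_position_py; infer_instance

def pvWitness_get_ident_at_position_py : String × Int × Int := ("ab cd", 0, 1)

-- On a negative column that wraps into the line (Python's negative indexing) onto a word character,
-- A returns an accidental slice such as '' or a fragment read from the wrapped position, while B
-- returns none — the intended answer, since the caller's column is out of range of the line.
def D_get_ident_at_position_py (source : String) (line : Int) (col : Int) : Prop :=
  line < (((PySem.Str.split? source "\n").getD []).length : Int) ∧
  -((((PySem.Str.split? source "\n").getD []).length : Int)) ≤ line ∧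
  -(((((PySem.List.pyGet? ((PySem.Str.split? source "\n").getD []) line).getD "").toList.length : Int))) ≤ col ∧
  col < 0 ∧
  pvIsWord (PySem.List.pyGetD (((PySem.List.pyGet? ((PySem.Str.split? source "\n").getD []) line).getD "").toList) col ' ') = true
instance (source : String) (line : Int) (col : Int) : Decidable (D_get_ident_at_position_py source line col) := by unfold D_get_ident_at_position_py; infer_instance

def Spec_get_ident_at_position_py (source : String) (line : Int) (col : Int) (out : Option String) : Prop := ¬ D_get_ident_at_position_py source line col → out = get_ident_at_position_py_alt source line col
instance (source : String) (line : Int) (col : Int) (out : Option String) : Decidable (Spec_get_ident_at_position_py source line col out) := by unfold Spec_get_ident_at_position_py; infer_instance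

def pvDiffWitness_get_ident_at_position_py : String × Int × Int := ("ab", 0, -1)
def pvDiffWitnessOut_get_ident_at_position_py : (Option String) × (Option String) := (some "b", none)

-- ===== CLAIM (what is proved, stated in full; the proofs are below) =====
def Claim_unchanged_get_ident_at_position_py : Prop := ∀ (source : String) (line : Int) (col : Int), Dom_get_ident_at_position_py source line col → Pre_get_ident_at_position_py source line col → Spec_get_ident_at_position_py source line col (get_ident_at_position_py source line col)
def Claim_changed_get_ident_at_position_py : Prop := Dom_get_ident_at_position_py (pvDiffWitness_get_ident_at_position_py.1) (pvDiffWitness_get_ident_at_position_py.2.1) (pvDiffWitness_get_ident_at_position_py.2.2) ∧ Pre_get_ident_at_position_py (pvDiffWitness_get_ident_at_position_py.1) (pvDiffWitness_get_ident_at_position_py.2.1) (pvDiffWitness_get_ident_at_position_py.2.2) ∧ D_get_ident_at_position_py (pvDiffWitness_get_ident_at_position_py.1) (pvDiffWitness_get_ident_at_position_py.2.1) (pvDiffWitness_get_ident_at_position_py.2.2) ∧ get_ident_at_position_py (pvDiffWitness_get_ident_at_position_py.1) (pvDiffWitness_get_ident_at_position_py.2.1) (pvDiffWitness_get_ident_at_position_py.2.2)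 = pvDiffWitnessOut_get_ident_at_position_py.1 ∧ get_ident_at_position_py_alt (pvDiffWitness_get_ident_at_position_py.1) (pvDiffWitness_get_ident_at_position_py.2.1) (pvDiffWitness_get_ident_at_position_py.2.2) = pvDiffWitnessOut_get_ident_at_position_py.2 ∧ pvDiffWitnessOut_get_ident_at_position_py.1 ≠ pvDiffWitnessOut_get_ident_at_position_py.2
def Claim_exact_get_ident_at_position_py : Prop := ∀ (source : String) (line : Int) (col : Int), Dom_get_ident_at_position_py source line col → Pre_get_ident_at_position_py source line col → D_get_ident_at_position_py source line col → get_ident_at_position_py source line col ≠ get_ident_at_position_py_alt source line col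

-- ===== LEMMAS AND PROOFS =====

theorem pv_brun_ge (tl : List Char) : ∀ f j, j ≤ pvBRun tl f j := by
  intro f
  induction f with
  | zero => intro j; simp [pvBRun]
  | succ f ih =>
    intro j
    simp only [pvBRun]
    split
    · exact le_trans (Nat.le_succ j) (ih (j+1))
    · exact le_refl j

theorem pv_brun_le (tl : List Char) : ∀ f j, j ≤ tl.length → pvBRun tl f j ≤ tl.length := by
  intro f
  induction f with
  | zero => intro j h; simpa [pvBRun] using h
  | succ f ih =>
    intro j h
    simp only [pvBRun]
    split
    · next hc => exact ih (j+1) hc.1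
    · exact h

theorem pv_brun_word (tl : List Char) : ∀ f j k, j ≤ k → k < pvBRun tl f j →
    pvIsWord (tl.getD k ' ') = true := by
  intro f
  induction f with
  | zero => intro j k h1 h2; simp [pvBRun] at h2; omega
  | succ f ih =>
    intro j k h1 h2
    simp only [pvBRun] at h2
    split at h2
    · next hc =>
      rcases Nat.eq_or_lt_of_le h1 with rfl | hlt
      · exact hc.2
      · exact ih (j+1) k hlt h2
    · omega

theorem pv_brun_stop (tl : List Char) : ∀ f j, j ≤ tl.length → tl.length - j ≤ f →
    pvBRun tl f j = tl.length ∨ pvIsWord (tl.getD (pvBRun tl f j) ' ') = false := by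
  intro f
  induction f with
  | zero => intro j h1 h2; left; simp [pvBRun]; omega
  | succ f ih =>
    intro j h1 h2
    simp only [pvBRun]
    split
    · next hc => exact ih (j+1) hc.1 (by omega)
    · next hc =>
      rcases Nat.eq_or_lt_of_le h1 with rfl | hlt
      · left; rfl
      · right; by_contra hw; exact hc ⟨hlt, by simpa using hw⟩

theorem pv_brun_congr (tl : List Char) (c : Nat) (hc : c < tl.length) :
    ∀ k, k ≤ c → (∀ m, k ≤ m → m < c → pvIsWord (tl.getD m ' ') = true) →
    pvBRun tl (tl.length - k) k = pvBRun tl (tl.length - c) c := by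
  intro k hkc hword
  induction hd : c - k generalizing k with
  | zero =>
    have : k = c := by omega
    subst this; rfl
  | succ d ih =>
    have hklt : k < c := by omega
    have : tl.length - k = (tl.length - (k+1)) + 1 := by omega
    rw [this]
    simp only [pvBRun]
    rw [if_pos ⟨by omega, hword k le_rfl hklt⟩]
    exact ih (k+1) (by omega) (fun m h1 h2 => hword m (by omega) h2) (by omega)

def pvLrun (tl : List Char) : Nat → Nat
  | 0 => 0
  | s+1 => if pvIsWord (tl.getD s ' ') = true then pvLrun tl s else s+1

theorem pv_astart_eq (tl : List Char) : ∀ s f, s ≤ f → pvAStart tl f (s : Int) = (pvLrun tl s : Int) := by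
  intro s
  induction s with
  | zero =>
    intro f _
    cases f with
    | zero => rfl
    | succ f => simp [pvAStart, pvLrun]
  | succ s ih =>
    intro f hf
    cases f with
    | zero => omega
    | succ f =>
      simp only [pvAStart]
      rw [show ((s+1 : Nat) : Int) - 1 = (s : Int) by push_cast; ring]
      rw [PySem.List.pyGetD_natCast]
      by_cases hw : pvIsWord (tl.getD s ' ') = true
      · rw [if_pos ⟨by positivity, hw⟩, ih f (by omega)]
        simp only [pvLrun]
        rw [if_pos hw]
      · rw [if_neg (fun h => hw h.2)]
        simp only [pvLrun]
        rw [if_neg hw]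

theorem pv_aend_eq (tl : List Char) : ∀ f (j : Nat), pvAEnd tl f (j : Int) = (pvBRun tl f j : Int) := by
  intro f
  induction f with
  | zero => intro j; rfl
  | succ f ih =>
    intro j
    simp only [pvAEnd, pvBRun, PySem.List.pyGetD_natCast]
    by_cases hc : j < tl.length ∧ pvIsWord (tl.getD j ' ') = true
    · rw [if_pos ⟨by exact_mod_cast hc.1, hc.2⟩, if_pos hc]
      have : ((j : Int) + 1) = ((j + 1 : Nat) : Int) := by push_cast; ring
      rw [this, ih]
    · have hc' : ¬ ((j : Int) < (tl.length : Int) ∧ pvIsWord (tl.getD j ' ') = true) := by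
        intro h; exact hc ⟨by exact_mod_cast h.1, h.2⟩
      rw [if_neg hc', if_neg hc]

theorem pv_aend_ge (tl : List Char) : ∀ f e, e ≤ pvAEnd tl f e := by
  intro f
  induction f with
  | zero => intro e; simp [pvAEnd]
  | succ f ih =>
    intro e
    simp only [pvAEnd]
    split
    · exact le_trans (by omega) (ih (e+1))
    · exact le_refl e

theorem pv_lrun_le (tl : List Char) : ∀ s, pvLrun tl s ≤ s := by
  intro s
  induction s with
  | zero => simp [pvLrun]
  | succ s ih => simp only [pvLrun]; split <;> omega

theorem pv_lrun_eq (tl : List Char) : ∀ s i, i ≤ s →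
    (i = 0 ∨ pvIsWord (tl.getD (i-1) ' ') = false) →
    (∀ m, i ≤ m → m < s → pvIsWord (tl.getD m ' ') = true) →
    pvLrun tl s = i := by
  intro s
  induction s with
  | zero => intro i h1 _ _; simp [pvLrun]; omega
  | succ s ih =>
    intro i h1 hb hword
    rcases Nat.eq_or_lt_of_le h1 with rfl | hlt
    · rcases hb with h0 | hw
      · omega
      · simp only [pvLrun]
        rw [if_neg (by simpa using hw)]
    · have hws : pvIsWord (tl.getD s ' ') = true := hword s (by omega) (by omega)
      simp only [pvLrun]
      rw [if_pos hws]
      exact ih i (by omega) hb (fun m hm1 hm2 => hword m hm1 (by omega))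

theorem pv_scan_mem (tl : List Char) : ∀ f i r, i ≤ tl.length → r ∈ pvBScan tl f i →
    r.2 ≤ tl.length ∧ ∀ k, r.1 ≤ k → k < r.2 → pvIsWord (tl.getD k ' ') = true := by
  intro f
  induction f with
  | zero => intro i r _ h; simp [pvBScan] at h
  | succ f ih =>
    intro i r hi h
    simp only [pvBScan] at h
    split at h
    · next hilt =>
      split at h
      · next hw =>
        rcases List.mem_cons.mp h with rfl | hmem
        · constructor
          · exact pv_brun_le tl _ (i+1) (by omega)
          · intro k h1 h2
            rcases Nat.eq_or_lt_of_le h1 with rfl | hlt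
            · exact hw
            · exact pv_brun_word tl _ (i+1) k hlt h2
        · exact ih _ r (pv_brun_le tl _ (i+1) (by omega)) hmem
      · exact ih _ r (by omega) h
    · simp at h

theorem pv_scan_find (tl : List Char) (c : Nat) (hc : c < tl.length)
    (hw : pvIsWord (tl.getD c ' ') = true) :
    ∀ f i, i ≤ c → tl.length - i ≤ f →
    (i = 0 ∨ pvIsWord (tl.getD (i-1) ' ') = false ∨ pvIsWord (tl.getD i ' ') = false) →
    (pvBScan tl f i).find? (fun r => decide ((r.1 : Int) ≤ (c : Int)) && decide ((c : Int) < (r.2 : Int)))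
      = some (pvLrun tl c, pvBRun tl (tl.length - c) c) := by
  intro f
  induction f with
  | zero => intro i h1 h2 _; omega
  | succ f ih =>
    intro i h1 h2 hb
    simp only [pvBScan]
    rw [if_pos (by omega : i < tl.length)]
    by_cases hwi : pvIsWord (tl.getD i ' ') = true
    · rw [if_pos hwi]
      by_cases hcj : c < pvBRun tl (tl.length - (i+1)) (i+1)
      · rw [List.find?_cons_of_pos (p := fun r : Nat × Nat => decide ((r.1 : Int) ≤ (c : Int)) && decide ((c : Int) < (r.2 : Int))) (by simp; omega)]
        have hword : ∀ m, i ≤ m → m < c → pvIsWord (tl.getD m ' ') = true := by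
          intro m hm1 hm2
          rcases Nat.eq_or_lt_of_le hm1 with rfl | hlt
          · exact hwi
          · exact pv_brun_word tl (tl.length - (i+1)) (i+1) m hlt (by omega)
        have hstart : pvLrun tl c = i := by
          apply pv_lrun_eq tl c i h1 _ hword
          rcases hb with h | h | h
          · exact Or.inl h
          · exact Or.inr h
          · rw [hwi] at h; simp at h
        have hstop : pvBRun tl (tl.length - (i+1)) (i+1) = pvBRun tl (tl.length - c) c := by
          rcases Nat.eq_or_lt_of_le h1 with rfl | hlt
          · have hn : tl.length - i = (tl.length - (i+1)) + 1 := by omega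
            conv_rhs => rw [hn]
            simp only [pvBRun]
            rw [if_pos ⟨hc, hw⟩]
          · exact pv_brun_congr tl c hc (i+1) (by omega)
              (fun m hm1 hm2 => hword m (by omega) hm2)
        rw [hstart, hstop]
      · rw [List.find?_cons_of_neg (p := fun r : Nat × Nat => decide ((r.1 : Int) ≤ (c : Int)) && decide ((c : Int) < (r.2 : Int))) (by simp; omega)]
        have hstop := pv_brun_stop tl (tl.length - (i+1)) (i+1) (by omega) le_rfl
        have hge := pv_brun_ge tl (tl.length - (i+1)) (i+1)
        apply ih _ (by omega) (by omega)
        rcases hstop with h | h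
        · omega
        · exact Or.inr (Or.inr h)
    · rw [if_neg hwi]
      have hne : i ≠ c := fun h => hwi (h ▸ hw)
      apply ih (i+1) (by omega) (by omega)
      right; left; simpa using hwi

-- B returns none wherever the column is not inside a run (out of range, negative, or on a non-word char)
theorem pv_alt_find_none_of_neg (tl : List Char) (col : Int) (hcol : col < 0) :
    (pvBScan tl tl.length 0).find? (fun r => decide ((r.1 : Int) ≤ col) && decide (col < (r.2 : Int))) = none := by
  apply List.find?_eq_none.mpr
  intro r _
  simp only [Bool.and_eq_true, decide_eq_true_eq, not_and]
  intro h
  omega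

theorem pv_alt_find_none_of_big (tl : List Char) (col : Int) (hcol : (tl.length : Int) ≤ col) :
    (pvBScan tl tl.length 0).find? (fun r => decide ((r.1 : Int) ≤ col) && decide (col < (r.2 : Int))) = none := by
  apply List.find?_eq_none.mpr
  intro r hr
  have hm := pv_scan_mem tl tl.length 0 r (Nat.zero_le _) hr
  simp only [Bool.and_eq_true, decide_eq_true_eq, not_and]
  intro _
  have : r.2 ≤ tl.length := hm.1
  omega

theorem pv_alt_find_none_of_nonword (tl : List Char) (c : Nat)
    (hw : pvIsWord (tl.getD c ' ') = false) :
    (pvBScan tl tl.length 0).find? (fun r => decide ((r.1 : Int) ≤ (c : Int)) && decide ((c : Int) < (r.2 : Int))) = none := by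
  apply List.find?_eq_none.mpr
  intro r hr
  have hm := pv_scan_mem tl tl.length 0 r (Nat.zero_le _) hr
  simp only [Bool.and_eq_true, decide_eq_true_eq, not_and]
  intro h1 h2
  have := hm.2 c (by omega) (by omega)
  rw [this] at hw
  simp at hw

-- ===== VERDICT (by name: the statement is the Claim_ definition above) =====
theorem get_ident_at_position_py_spec : Claim_unchanged_get_ident_at_position_py := by
  intro source line col _ hpre hnD
  unfold Pre_get_ident_at_position_py at hpre
  unfold D_get_ident_at_position_py at hnD
  show get_ident_at_position_py source line col = get_ident_at_position_py_alt source line col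
  unfold get_ident_at_position_py get_ident_at_position_py_alt
  cases hs : PySem.Str.split? source "\n" with
  | none => rfl
  | some lines =>
    rw [hs] at hpre hnD
    simp only [Option.getD_some] at hpre hnD
    by_cases hline : (lines.length : Int) ≤ line
    · simp only [if_pos hline]
    · simp only [if_neg hline]
      have hlo : -(lines.length : Int) ≤ line := by
        rcases hpre with h | h
        · omega
        · exact h.1
      cases hg : PySem.List.pyGet? lines line with
      | none =>
        exfalso
        rw [PySem.List.pyGet?_eq_none_iff] at hg
        exact hg (by unfold PySem.Raise.InRange; omega)
      | some t =>
        rw [hg] at hpre hnD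
        simp only [Option.getD_some] at hpre hnD
        have hcol : -(t.toList.length : Int) ≤ col := by
          rcases hpre with h | h
          · omega
          · exact h.2
        by_cases hbig : (t.toList.length : Int) ≤ col
        · simp only [if_pos hbig]
          rw [pv_alt_find_none_of_big t.toList col hbig]
        · simp only [if_neg hbig]
          by_cases hc0 : 0 ≤ col
          · obtain ⟨c, rfl⟩ : ∃ c : Nat, col = (c : Int) := ⟨col.toNat, (Int.toNat_of_nonneg hc0).symm⟩
            have hcn : c < t.toList.length := by omega
            rw [PySem.List.pyGet?_natCast, List.getElem?_eq_getElem hcn]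
            dsimp only
            simp only [Int.toNat_natCast]
            have hgd : t.toList.getD c ' ' = t.toList[c] := List.getD_eq_getElem t.toList ' ' hcn
            by_cases hw : pvIsWord t.toList[c] = true
            · rw [if_pos hw]
              have hw' : pvIsWord (t.toList.getD c ' ') = true := by rw [hgd]; exact hw
              rw [pv_scan_find t.toList c hcn hw' t.toList.length 0 (Nat.zero_le _) (by omega) (Or.inl rfl)]
              rw [pv_astart_eq t.toList c c le_rfl]
              have hfuel : ((t.toList.length : Int) - (c : Int)).toNat = t.toList.length - c := by omega
              rw [hfuel, pv_aend_eq t.toList (t.toList.length - c) c]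
              have hlt : pvLrun t.toList c < pvBRun t.toList (t.toList.length - c) c := by
                have h1 := pv_lrun_le t.toList c
                have hn : t.toList.length - c = (t.toList.length - (c+1)) + 1 := by omega
                have h2 : c + 1 ≤ pvBRun t.toList (t.toList.length - c) c := by
                  rw [hn]
                  simp only [pvBRun]
                  rw [if_pos ⟨hcn, hw'⟩]
                  exact pv_brun_ge t.toList _ (c+1)
                omega
              rw [if_neg (by exact_mod_cast Nat.ne_of_lt hlt)]
            · rw [if_neg hw]
              have hw' : pvIsWord (t.toList.getD c ' ') = false := by
                rw [hgd]; simpa using hw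
              rw [pv_alt_find_none_of_nonword t.toList c hw']
          · have hneg : col < 0 := by omega
            have hwf : pvIsWord (PySem.List.pyGetD t.toList col ' ') = false := by
              by_contra hcontra
              exact hnD ⟨by omega, hlo, hcol, hneg, by simpa using hcontra⟩
            cases hg2 : PySem.List.pyGet? t.toList col with
            | none =>
              exfalso
              rw [PySem.List.pyGet?_eq_none_iff] at hg2
              exact hg2 (by unfold PySem.Raise.InRange; omega)
            | some ch =>
              have hch : pvIsWord ch = false := by
                have : PySem.List.pyGetD t.toList col ' ' = ch := by
                  simp [PySem.List.pyGetD, hg2]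
                rw [this] at hwf
                exact hwf
              rw [pv_alt_find_none_of_neg t.toList col hneg]
              dsimp only
              rw [if_neg (by simp [hch])]

theorem get_ident_at_position_py_changed : Claim_changed_get_ident_at_position_py := by
  unfold Claim_changed_get_ident_at_position_py; decide

theorem get_ident_at_position_py_tight : Claim_exact_get_ident_at_position_py := by
  intro source line col _ hpre hD
  unfold D_get_ident_at_position_py at hD
  unfold get_ident_at_position_py get_ident_at_position_py_alt
  cases hs : PySem.Str.split? source "\n" with
  | none =>
    exfalso
    rw [hs] at hD
    simp only [Option.getD_none] at hD
    obtain ⟨h1, h2, _⟩ := hD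
    simp only [List.length_nil, Nat.cast_zero] at h1 h2
    omega
  | some lines =>
    rw [hs] at hD
    simp only [Option.getD_some] at hD
    obtain ⟨hd1, hd2, hd3, hd4, hd5⟩ := hD
    simp only [if_neg (by omega : ¬ (lines.length : Int) ≤ line)]
    cases hg : PySem.List.pyGet? lines line with
    | none =>
      exfalso
      rw [PySem.List.pyGet?_eq_none_iff] at hg
      exact hg (by unfold PySem.Raise.InRange; omega)
    | some t =>
      rw [hg] at hd3 hd5
      simp only [Option.getD_some] at hd3 hd5
      have hn1 : 0 < t.toList.length := by omega
      simp only [if_neg (by omega : ¬ (t.toList.length : Int) ≤ col)]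
      cases hg2 : PySem.List.pyGet? t.toList col with
      | none =>
        exfalso
        rw [PySem.List.pyGet?_eq_none_iff] at hg2
        exact hg2 (by unfold PySem.Raise.InRange; omega)
      | some ch =>
        have hch : pvIsWord ch = true := by
          have : PySem.List.pyGetD t.toList col ' ' = ch := by
            simp [PySem.List.pyGetD, hg2]
          rw [this] at hd5
          exact hd5
        rw [pv_alt_find_none_of_neg t.toList col hd4]
        dsimp only
        rw [if_pos hch]
        have hstart : pvAStart t.toList col.toNat col = col := by
          have : col.toNat = 0 := by omega
          rw [this]
          rfl
        have hstop : col + 1 ≤ pvAEnd t.toList ((t.toList.length : Int) - col).toNat col := by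
          have hfp : ∃ f, ((t.toList.length : Int) - col).toNat = f + 1 := by
            refine ⟨((t.toList.length : Int) - col).toNat - 1, by omega⟩
          obtain ⟨f, hf⟩ := hfp
          rw [hf]
          simp only [pvAEnd]
          have hcond : col < (t.toList.length : Int) ∧ pvIsWord (PySem.List.pyGetD t.toList col ' ') = true := by
            constructor
            · omega
            · exact hd5
          rw [if_pos hcond]
          calc col + 1 ≤ pvAEnd t.toList f (col + 1) := pv_aend_ge t.toList f (col + 1)
            _ = _ := rfl
        rw [hstart]
        rw [if_neg (by omega : ¬ col = pvAEnd t.toList ((t.toList.length : Int) - col).toNat col)]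
        simp
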